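-- pv_equiv track=rewrite | github.com/SansPapyrus683/green-new-deal-heckers | 2015/day5/tooGreedy.py | goodGoodBad
-- ===== SOURCE A (Python) =====
-- def goodGoodBad(child):
--     sandwichReq = False
--     doubleDoubleReq = False
--     doubleArchives = {}
--     for v, c in enumerate(child):
--         if v >= 2 and child[v - 2] == c:
--             sandwichReq = True
--
--         if v >= 1 and child[v - 1: v + 1] in child[v + 1:]:
--             doubleDoubleReq = True
--         doubleArchives[child[v - 1: v + 1]] = [v - 1, v]
--
--     return sandwichReq and doubleDoubleReq
-- ===== SOURCE B (Python) =====
-- def goodGoodBad(child):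
--     n = len(child)
--     sandwich = False
--     pair_rep = False
--     first = {}  # pair -> index of its first occurrence
--     for i in range(n - 1):
--         if i + 2 < n and child[i] == child[i + 2]:
--             sandwich = True
--         p = child[i:i + 2]
--         j = first.get(p)
--         if j is None:
--             first[p] = i
--         elif i - j >= 2:
--             pair_rep = True
--     return sandwich and pair_rep
-- ===== Notes on version B (the rewrite author's own statement) =====
-- stated objective: faster
-- what changed: Replaces the per-index substring search 'pair in child[v+1:]' (quadratic) by a single pass that records each pair's first occurrence index in a dict and flags a repeat when the current occurrence is at least 2 positions later; the dead doubleArchives dict is dropped and the sandwich check is folded into the same pass.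
import Mathlib
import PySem

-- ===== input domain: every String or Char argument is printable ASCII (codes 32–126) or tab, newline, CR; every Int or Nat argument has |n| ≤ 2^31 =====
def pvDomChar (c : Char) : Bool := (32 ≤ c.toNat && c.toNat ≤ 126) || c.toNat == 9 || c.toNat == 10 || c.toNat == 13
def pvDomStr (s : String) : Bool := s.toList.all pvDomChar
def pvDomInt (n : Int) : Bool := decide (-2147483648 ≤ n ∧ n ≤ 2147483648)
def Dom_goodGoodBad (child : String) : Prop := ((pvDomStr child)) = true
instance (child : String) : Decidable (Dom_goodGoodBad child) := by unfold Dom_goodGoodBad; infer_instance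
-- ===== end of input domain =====

-- B replaces A's per-index substring search by a single pass with a dict of each pair's
-- first occurrence index (objective: faster); return value proved identical on all strings.

-- ===== PORT A =====
-- loop body of A's 'for v, c in enumerate(child)' (state: sandwichReq, doubleDoubleReq, doubleArchives)
def pvStepA (s : List Char) (st : Bool × Bool × PySem.Dict (List Char) (List Int)) (vc : Int × Char) :
    Bool × Bool × PySem.Dict (List Char) (List Int) :=
  let v := vc.1
  let c := vc.2
  let sand := if 2 ≤ v ∧ PySem.List.pyGet? s (v - 2) = some c then true else st.1
  let dbl := if 1 ≤ v ∧ PySem.Chars.isIn (PySem.List.slice s (some (v - 1)) (some (v + 1)))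
                          (PySem.List.slice s (some (v + 1)) none) = true then true else st.2.1
  let arch := st.2.2.insert (PySem.List.slice s (some (v - 1)) (some (v + 1))) [v - 1, v]
  (sand, dbl, arch)

def goodGoodBad (child : String) : Bool :=
  let s := child.toList
  let r := (PySem.List.enumerate s 0).foldl (pvStepA s) (false, false, PySem.Dict.empty)
  r.1 && r.2.1

-- ===== PORT B =====
-- loop body of B's 'for i in range(n - 1)' (state: sandwich, pair_rep, first)
def pvStepB (s : List Char) (n : Int) (st : Bool × Bool × PySem.Dict (List Char) Int) (i : Int) :
    Bool × Bool × PySem.Dict (List Char) Int :=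
  let sand := if i + 2 < n ∧ PySem.List.pyGet? s i = PySem.List.pyGet? s (i + 2) then true else st.1
  let p := PySem.List.slice s (some i) (some (i + 2))
  match st.2.2.get? p with
  | none => (sand, st.2.1, st.2.2.insert p i)
  | some j => (sand, if 2 ≤ i - j then true else st.2.1, st.2.2)

def goodGoodBad_alt (child : String) : Bool :=
  let s := child.toList
  let n : Int := s.length
  let r := (PySem.List.pyRange 0 (n - 1) 1).foldl (pvStepB s n) (false, false, PySem.Dict.empty)
  r.1 && r.2.1

-- ===== PRECONDITION & SPEC =====
def Spec_goodGoodBad (child : String) (out : Bool) : Prop := out = goodGoodBad_alt child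
instance (child : String) (out : Bool) : Decidable (Spec_goodGoodBad child out) := by unfold Spec_goodGoodBad; infer_instance

-- ===== CLAIM (what is proved, stated in full; the proofs are below) =====
def Claim_equal_goodGoodBad : Prop := ∀ (child : String), Dom_goodGoodBad child → Spec_goodGoodBad child (goodGoodBad child)

-- ===== LEMMAS AND PROOFS =====

-- the two-character window starting at j (child[j:j+2])
def pvPair (s : List Char) (j : Nat) : List Char := (s.drop j).take 2

-- canonical characterisations both programs are reduced to
def pvSandP (s : List Char) : Prop := ∃ v, v < s.length ∧ 2 ≤ v ∧ s[v-2]? = s[v]?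
def pvPairP (s : List Char) : Prop := ∃ j k, j + 2 ≤ k ∧ k + 2 ≤ s.length ∧ pvPair s j = pvPair s k

lemma pvFoldA (s : List Char) (l : List (Int × Char)) (st : Bool × Bool × PySem.Dict (List Char) (List Int)) :
    ((l.foldl (pvStepA s) st).1 = true ↔
      st.1 = true ∨ ∃ vc ∈ l, 2 ≤ vc.1 ∧ PySem.List.pyGet? s (vc.1 - 2) = some vc.2) ∧
    ((l.foldl (pvStepA s) st).2.1 = true ↔
      st.2.1 = true ∨ ∃ vc ∈ l, 1 ≤ vc.1 ∧
        PySem.Chars.isIn (PySem.List.slice s (some (vc.1 - 1)) (some (vc.1 + 1)))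
          (PySem.List.slice s (some (vc.1 + 1)) none) = true) := by
  induction l generalizing st with
  | nil => simp
  | cons x t ih =>
    obtain ⟨ih1, ih2⟩ := ih (pvStepA s st x)
    constructor
    · rw [List.foldl_cons, ih1]
      simp only [pvStepA, List.mem_cons]
      constructor
      · rintro (h | h)
        · split_ifs at h with hc
          · exact Or.inr ⟨x, Or.inl rfl, hc⟩
          · exact Or.inl h
        · obtain ⟨vc, hm, hp⟩ := h; exact Or.inr ⟨vc, Or.inr hm, hp⟩
      · rintro (h | ⟨vc, (rfl | hm), hp⟩)
        · left; split_ifs <;> simp [h]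
        · left; simp [hp]
        · exact Or.inr ⟨vc, hm, hp⟩
    · rw [List.foldl_cons, ih2]
      simp only [pvStepA, List.mem_cons]
      constructor
      · rintro (h | h)
        · split_ifs at h with hc
          · exact Or.inr ⟨x, Or.inl rfl, hc⟩
          · exact Or.inl h
        · obtain ⟨vc, hm, hp⟩ := h; exact Or.inr ⟨vc, Or.inr hm, hp⟩
      · rintro (h | ⟨vc, (rfl | hm), hp⟩)
        · left; split_ifs <;> simp [h]
        · left; simp [hp]
        · exact Or.inr ⟨vc, hm, hp⟩

lemma pvPrefix_pair (s : List Char) (u : List Char) (hu : u.length = 2) (b : Nat) :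
    u <+: s.drop b ↔ (b + 2 ≤ s.length ∧ u = pvPair s b) := by
  rw [List.prefix_iff_eq_take]
  constructor
  · intro h
    have hl := congrArg List.length h
    simp [hu] at hl
    constructor
    · omega
    · rw [hu] at h; exact h
  · rintro ⟨hb, rfl⟩
    rw [hu]; rfl

lemma pvIsIn_iff (s : List Char) (k : Nat) (hk1 : 1 ≤ k) (hk : k < s.length) :
    PySem.Chars.isIn (pvPair s (k-1)) (s.drop (k+1)) = true ↔
      ∃ b, k + 1 ≤ b ∧ b + 2 ≤ s.length ∧ pvPair s (k-1) = pvPair s b := by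
  have hlen : (pvPair s (k-1)).length = 2 := by
    simp [pvPair, List.length_take, List.length_drop]; omega
  rw [← PySem.Chars.exists_prefix_drop_iff_isIn]
  constructor
  · rintro ⟨j, hj⟩
    rw [List.drop_drop] at hj
    rw [pvPrefix_pair s _ hlen] at hj
    exact ⟨k + 1 + j, by omega, hj.1, hj.2⟩
  · rintro ⟨b, hb1, hb2, hb3⟩
    refine ⟨b - (k+1), ?_⟩
    rw [List.drop_drop, pvPrefix_pair s _ hlen]
    have h : k + 1 + (b - (k+1)) = b := by omega
    rw [h]
    exact ⟨hb2, hb3⟩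

lemma pvSlice_pair (s : List Char) (k : Nat) (hk : 1 ≤ k) :
    PySem.List.slice s (some ((k:Int) - 1)) (some ((k:Int) + 1)) = pvPair s (k-1) := by
  have h1 : (k:Int) - 1 = ((k-1 : Nat) : Int) := by push_cast [hk]; omega
  have h2 : (k:Int) + 1 = ((k+1 : Nat) : Int) := by push_cast; ring
  rw [h1, h2, PySem.List.slice_natCast]
  have h3 : k + 1 - (k - 1) = 2 := by omega
  rw [h3]; rfl

lemma pvA_iff (child : String) :
    goodGoodBad child = true ↔ pvSandP child.toList ∧ pvPairP child.toList := by
  unfold goodGoodBad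
  simp only [Bool.and_eq_true]
  rw [(pvFoldA child.toList _ _).1, (pvFoldA child.toList _ _).2]
  simp only [Bool.false_eq_true, false_or]
  apply and_congr
  · constructor
    · rintro ⟨vc, hm, h2, hget⟩
      rw [PySem.List.mem_enumerate_iff] at hm
      obtain ⟨k, hk, rfl⟩ := hm
      simp only [zero_add] at h2 hget
      have hk2 : 2 ≤ k := by exact_mod_cast h2
      have e : (k:Int) - 2 = ((k-2 : Nat) : Int) := by omega
      rw [e, PySem.List.pyGet?_natCast] at hget
      refine ⟨k, hk, hk2, ?_⟩
      rw [List.getElem?_eq_getElem hk, hget]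
    · rintro ⟨v, hv, h2, hget⟩
      refine ⟨(0 + (v:Int), child.toList[v]), ?_, ?_, ?_⟩
      · rw [PySem.List.mem_enumerate_iff]; exact ⟨v, hv, rfl⟩
      · omega
      · have e : (0 + (v:Int)) - 2 = ((v-2 : Nat) : Int) := by omega
        rw [e, PySem.List.pyGet?_natCast]
        rw [List.getElem?_eq_getElem hv] at hget
        exact hget
  · constructor
    · rintro ⟨vc, hm, h1, hin⟩
      rw [PySem.List.mem_enumerate_iff] at hm
      obtain ⟨k, hk, rfl⟩ := hm
      simp only [zero_add] at h1 hin
      have hk1 : 1 ≤ k := by exact_mod_cast h1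
      have e : (k:Int) + 1 = ((k+1 : Nat) : Int) := by push_cast; ring
      rw [pvSlice_pair _ _ hk1, e, PySem.List.slice_from_natCast] at hin
      rw [pvIsIn_iff _ _ hk1 hk] at hin
      obtain ⟨b, hb1, hb2, hb3⟩ := hin
      exact ⟨k - 1, b, by omega, hb2, hb3⟩
    · rintro ⟨j, k2, hjk, hk2, hpair⟩
      have hlt : j + 1 < child.toList.length := by omega
      refine ⟨(0 + ((j+1 : Nat):Int), child.toList[j+1]), ?_, ?_, ?_⟩
      · rw [PySem.List.mem_enumerate_iff]; exact ⟨j+1, hlt, rfl⟩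
      · omega
      · simp only [zero_add]
        have e : ((j+1 : Nat):Int) + 1 = ((j+2 : Nat) : Int) := by push_cast; ring
        rw [pvSlice_pair _ _ (by omega), e, PySem.List.slice_from_natCast]
        rw [pvIsIn_iff _ _ (by omega) hlt]
        exact ⟨k2, by omega, hk2, by simpa using hpair⟩

lemma pvFind?_min {p : Nat → Bool} : ∀ {l : List Nat}, l.Pairwise (· < ·) →
    ∀ {j : Nat}, l.find? p = some j → ∀ x ∈ l, p x = true → j ≤ x := by
  intro l hl
  induction l with
  | nil => intro j h; simp at h
  | cons a t ih =>
    intro j h x hx hpx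
    by_cases hpa : p a = true
    · rw [List.find?_cons_of_pos hpa] at h
      obtain rfl : j = a := by simpa using h.symm
      rcases List.mem_cons.mp hx with rfl | hx
      · exact le_refl _
      · exact le_of_lt ((List.pairwise_cons.mp hl).1 x hx)
    · rw [List.find?_cons_of_neg hpa] at h
      rcases List.mem_cons.mp hx with rfl | hx
      · exact absurd hpx hpa
      · exact ih (List.pairwise_cons.mp hl).2 h x hx hpx

lemma pvSliceB_pair (s : List Char) (m : Nat) :
    PySem.List.slice s (some (m:Int)) (some ((m:Int) + 2)) = pvPair s m := by
  have e : (m:Int) + 2 = ((m+2 : Nat):Int) := by push_cast; ring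
  rw [e, PySem.List.slice_natCast]
  have h : m + 2 - m = 2 := by omega
  rw [h]; rfl

lemma pvStepB_none (s : List Char) (n : Int) (st : Bool × Bool × PySem.Dict (List Char) Int) (i : Int)
    (h : st.2.2.get? (PySem.List.slice s (some i) (some (i+2))) = none) :
    pvStepB s n st i = ((if i + 2 < n ∧ PySem.List.pyGet? s i = PySem.List.pyGet? s (i + 2) then true else st.1),
      st.2.1, st.2.2.insert (PySem.List.slice s (some i) (some (i+2))) i) := by
  simp only [pvStepB, h]

lemma pvStepB_some (s : List Char) (n : Int) (st : Bool × Bool × PySem.Dict (List Char) Int) (i : Int)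
    (jv : Int) (h : st.2.2.get? (PySem.List.slice s (some i) (some (i+2))) = some jv) :
    pvStepB s n st i = ((if i + 2 < n ∧ PySem.List.pyGet? s i = PySem.List.pyGet? s (i + 2) then true else st.1),
      (if 2 ≤ i - jv then true else st.2.1), st.2.2) := by
  simp only [pvStepB, h]

lemma pvFoldB (s : List Char) (m : Nat) :
    (((PySem.List.pyRange 0 (m:Int) 1).foldl (pvStepB s (s.length:Int)) (false, false, PySem.Dict.empty)).1 = true ↔
        ∃ i, i < m ∧ i + 2 < s.length ∧ s[i]? = s[i+2]?) ∧
    (((PySem.List.pyRange 0 (m:Int) 1).foldl (pvStepB s (s.length:Int)) (false, false, PySem.Dict.empty)).2.1 = true ↔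
        ∃ k, k < m ∧ ∃ j, j + 2 ≤ k ∧ pvPair s j = pvPair s k) ∧
    (∀ q, ((PySem.List.pyRange 0 (m:Int) 1).foldl (pvStepB s (s.length:Int)) (false, false, PySem.Dict.empty)).2.2.get? q =
        ((List.range m).find? (fun j => pvPair s j == q)).map (fun j => (j : Int))) := by
  induction m with
  | zero =>
    rw [show ((0:Nat):Int) = 0 by norm_num, PySem.List.pyRange_one_eq_nil (le_refl 0)]
    simp [PySem.Dict.get?_empty]
  | succ m ih =>
    obtain ⟨ih1, ih2, ih3⟩ := ih
    rw [show ((m+1 : Nat):Int) = (m:Int) + 1 by push_cast; ring,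
        PySem.List.pyRange_one_succ_right (by positivity), List.foldl_append, List.foldl_cons,
        List.foldl_nil]
    set r := (PySem.List.pyRange 0 (m:Int) 1).foldl (pvStepB s (s.length:Int)) (false, false, PySem.Dict.empty) with hr
    have hSand : ((if ((m:Int) + 2 < (s.length:Int) ∧ PySem.List.pyGet? s (m:Int) = PySem.List.pyGet? s ((m:Int)+2)) then true else r.1) = true ↔
        ∃ i, i < m + 1 ∧ i + 2 < s.length ∧ s[i]? = s[i+2]?) := by
      have hc : (((m:Int) + 2 < (s.length:Int) ∧ PySem.List.pyGet? s (m:Int) = PySem.List.pyGet? s ((m:Int)+2))) ↔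
          (m + 2 < s.length ∧ s[m]? = s[m+2]?) := by
        rw [PySem.List.pyGet?_natCast, show (m:Int) + 2 = ((m+2:Nat):Int) by push_cast; ring,
            PySem.List.pyGet?_natCast]
        constructor <;> rintro ⟨a, b⟩ <;> exact ⟨by exact_mod_cast a, b⟩
      by_cases hC : ((m:Int) + 2 < (s.length:Int) ∧ PySem.List.pyGet? s (m:Int) = PySem.List.pyGet? s ((m:Int)+2))
      · rw [if_pos hC]
        obtain ⟨a, b⟩ := hc.mp hC
        exact iff_of_true rfl ⟨m, by omega, a, b⟩
      · rw [if_neg hC, ih1]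
        constructor
        · rintro ⟨i, hi, h2, h3⟩; exact ⟨i, by omega, h2, h3⟩
        · rintro ⟨i, hi, h2, h3⟩
          rcases Nat.lt_succ_iff_lt_or_eq.mp hi with hi' | rfl
          · exact ⟨i, hi', h2, h3⟩
          · exact absurd (hc.mpr ⟨h2, h3⟩) hC
    have hg := ih3 (pvPair s m)
    cases hfind : (List.range m).find? (fun j => pvPair s j == pvPair s m) with
    | none =>
      rw [hfind] at hg; simp at hg
      rw [pvStepB_none _ _ _ _ (by rw [pvSliceB_pair]; exact hg)]
      simp only [pvSliceB_pair]
      refine ⟨hSand, ?_, ?_⟩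
      · rw [ih2]
        have hnone := List.find?_eq_none.mp hfind
        constructor
        · rintro ⟨k, hk, hrest⟩; exact ⟨k, by omega, hrest⟩
        · rintro ⟨k, hk, j, hj2, hjp⟩
          rcases Nat.lt_succ_iff_lt_or_eq.mp hk with hk' | rfl
          · exact ⟨k, hk', j, hj2, hjp⟩
          · exact absurd (by simpa using hjp) (by simpa using hnone j (List.mem_range.mpr (by omega)))
      · intro q
        rw [List.range_succ, List.find?_append]
        by_cases hq : q = pvPair s m
        · subst hq
          rw [PySem.Dict.get?_insert_self, hfind]
          simp
        · rw [PySem.Dict.get?_insert_of_ne _ _ hq, ih3 q]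
          have hnil : (List.find? (fun j => pvPair s j == q) [m]) = none := by
            rw [List.find?_eq_none]
            intro x hx
            rw [List.mem_singleton] at hx
            subst hx
            simp [Ne.symm hq]
          rw [hnil, Option.or_none]
    | some j =>
      rw [hfind] at hg; simp at hg
      rw [pvStepB_some _ _ _ _ _ (by rw [pvSliceB_pair]; exact hg)]
      have hjm : j < m := List.mem_range.mp (List.mem_of_find?_eq_some hfind)
      have hjp : pvPair s j = pvPair s m := by simpa using List.find?_some hfind
      refine ⟨hSand, ?_, ?_⟩
      · dsimp only
        by_cases hge : j + 2 ≤ m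
        · have hcond : (2:Int) ≤ (m:Int) - (j:Int) := by omega
          rw [if_pos hcond]
          exact iff_of_true rfl ⟨m, by omega, j, hge, hjp⟩
        · have hcond : ¬ ((2:Int) ≤ (m:Int) - (j:Int)) := by omega
          rw [if_neg hcond, ih2]
          constructor
          · rintro ⟨k, hk, hrest⟩; exact ⟨k, by omega, hrest⟩
          · rintro ⟨k, hk, j', hj2, hjp'⟩
            rcases Nat.lt_succ_iff_lt_or_eq.mp hk with hk' | rfl
            · exact ⟨k, hk', j', hj2, hjp'⟩
            · have hmin : j ≤ j' := pvFind?_min List.pairwise_lt_range hfind j'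
                (List.mem_range.mpr (by omega)) (by simpa using hjp')
              omega
      · intro q
        dsimp only
        rw [List.range_succ, List.find?_append, ih3 q]
        cases hq2 : (List.range m).find? (fun j => pvPair s j == q) with
        | some j2 => rw [Option.some_or]
        | none =>
          by_cases hq : q = pvPair s m
          · subst hq; rw [hq2] at hfind; simp at hfind
          · have hnil : (List.find? (fun j => pvPair s j == q) [m]) = none := by
              rw [List.find?_eq_none]
              intro x hx
              rw [List.mem_singleton] at hx
              subst hx
              simp [Ne.symm hq]
            rw [hnil, Option.or_none]

lemma pvB_iff (child : String) :
    goodGoodBad_alt child = true ↔ pvSandP child.toList ∧ pvPairP child.toList := by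
  unfold goodGoodBad_alt
  simp only [Bool.and_eq_true]
  have hrange : PySem.List.pyRange 0 ((child.toList.length:Int) - 1) 1 =
      PySem.List.pyRange 0 ((child.toList.length - 1 : Nat):Int) 1 := by
    rcases Nat.eq_zero_or_pos child.toList.length with h0 | hpos
    · rw [h0]
      norm_num
    · congr 1
      omega
  rw [hrange]
  obtain ⟨h1, h2, _⟩ := pvFoldB child.toList (child.toList.length - 1)
  rw [h1, h2]
  apply and_congr
  · constructor
    · rintro ⟨i, _, h2', h3⟩
      refine ⟨i + 2, h2', by omega, ?_⟩
      simpa using h3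
    · rintro ⟨v, hv, hv2, hget⟩
      refine ⟨v - 2, by omega, by omega, ?_⟩
      have e : v - 2 + 2 = v := by omega
      rw [e]
      exact hget
  · constructor
    · rintro ⟨k, hk, j, hj2, hjp⟩
      exact ⟨j, k, hj2, by omega, hjp⟩
    · rintro ⟨j, k, hj2, hk2, hjp⟩
      exact ⟨k, by omega, j, hj2, hjp⟩

-- ===== VERDICT (by name: the statement is the Claim_ definition above) =====
theorem goodGoodBad_spec : Claim_equal_goodGoodBad := by
  intro child _
  unfold Spec_goodGoodBad
  rw [Bool.eq_iff_iff, pvA_iff, pvB_iff]
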